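-- pv_equiv track=rewrite | github.com/struggl/DataStructure | python程序员面试宝典/数组/4.1如何找出数组中唯一的重复元素.py | findDup3
-- ===== SOURCE A (Python) =====
-- def findDup3(arr):
-- 	if arr is None:
-- 		return
-- 	if type(arr) != list:
-- 		return
-- 	res = 0
-- 	for i in range(len(arr)):
-- 		res ^= arr[i]
-- 	for i in range(len(arr)):
-- 		#因为a^0=a，所以没必要一定要使遍历范围为range(1,len(arr))
-- 		res ^= i
-- 	return res
-- ===== SOURCE B (Python) =====
-- def findDup3(arr):
-- 	if arr is None:
-- 		return
-- 	if type(arr) != list: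
-- 		return
-- 	res = 0
-- 	for v in arr:
-- 		res ^= v
-- 	# XOR of 0..n-1 in closed form (period-4 identity) instead of a second loop
-- 	n = len(arr)
-- 	r = n % 4
-- 	if r == 0:
-- 		idx = 0
-- 	elif r == 1:
-- 		idx = n - 1
-- 	elif r == 2:
-- 		idx = 1
-- 	else:
-- 		idx = n
-- 	return res ^ idx
-- ===== Notes on version B (the rewrite author's own statement) =====
-- stated objective: faster
-- what changed: The second loop XORing the indices 0..n-1 is replaced by the O(1) period-4 closed form on n = len(arr) (n%4: 0->0, 1->n-1, 2->1, 3->n), leaving one pass over the elements instead of two loops.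
import Mathlib
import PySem

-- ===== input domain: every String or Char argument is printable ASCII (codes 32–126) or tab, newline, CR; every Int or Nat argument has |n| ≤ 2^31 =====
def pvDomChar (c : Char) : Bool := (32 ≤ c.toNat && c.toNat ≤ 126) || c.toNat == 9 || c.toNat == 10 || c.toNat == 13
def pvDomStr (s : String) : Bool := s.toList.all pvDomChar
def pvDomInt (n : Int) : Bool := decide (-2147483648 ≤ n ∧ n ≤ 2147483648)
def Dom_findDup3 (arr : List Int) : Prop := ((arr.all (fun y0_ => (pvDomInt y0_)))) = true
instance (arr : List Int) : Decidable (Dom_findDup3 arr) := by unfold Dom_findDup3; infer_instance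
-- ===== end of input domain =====

-- B replaces A's second loop (XOR of the indices 0..n-1) by the O(1) period-4 closed form on n = len(arr).
-- Under the type convention arr is always a list of ints, so A's None/non-list guards cannot fire and are not ported.

-- ===== PORT A =====
def findDup3 (arr : List Int) : Option Int :=
  let res : Int :=
    (PySem.List.pyRange 0 (arr.length : Int) 1).foldl
      (fun r i => PySem.Int.bxor r (PySem.List.pyGetD arr i 0)) 0
  let res : Int :=
    (PySem.List.pyRange 0 (arr.length : Int) 1).foldl
      (fun r i => PySem.Int.bxor r i) res
  some res

-- ===== PORT B =====
def findDup3_alt (arr : List Int) : Option Int :=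
  let res : Int := arr.foldl (fun r v => PySem.Int.bxor r v) 0
  let n : Int := (arr.length : Int)
  let r : Int := PySem.Int.mod n 4
  let idx : Int := if r = 0 then 0 else if r = 1 then n - 1 else if r = 2 then 1 else n
  some (PySem.Int.bxor res idx)

-- ===== PRECONDITION & SPEC =====
def Spec_findDup3 (arr : List Int) (out : Option Int) : Prop := out = findDup3_alt arr
instance (arr : List Int) (out : Option Int) : Decidable (Spec_findDup3 arr out) := by unfold Spec_findDup3; infer_instance

-- ===== CLAIM (what is proved, stated in full; the proofs are below) =====
def Claim_equal_findDup3 : Prop := ∀ (arr : List Int), Dom_findDup3 arr → Spec_findDup3 arr (findDup3 arr)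

-- ===== LEMMAS AND PROOFS =====

-- XOR of a Nat-valued operand associates out of bxor even when the accumulator is negative
theorem bxor_assoc_natR (r : Int) (a b : Nat) :
    PySem.Int.bxor (PySem.Int.bxor r (a : Int)) (b : Int) = PySem.Int.bxor r ((a ^^^ b : Nat) : Int) := by
  by_cases hr : 0 ≤ r
  · rw [PySem.Int.bxor_of_nonneg hr (Int.natCast_nonneg a)]
    rw [PySem.Int.bxor_of_nonneg (Int.natCast_nonneg _) (Int.natCast_nonneg b)]
    rw [PySem.Int.bxor_of_nonneg hr (Int.natCast_nonneg _)]
    simp [Nat.xor_assoc]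
  · have h1 : PySem.Int.bxor r (a : Int) = -(((-r - 1).toNat ^^^ a : Nat) : Int) - 1 := by
      simp [PySem.Int.bxor, hr]
    have hneg : ¬ (0 : Int) ≤ -(((-r - 1).toNat ^^^ a : Nat) : Int) - 1 := by
      have : (0 : Int) ≤ (((-r - 1).toNat ^^^ a : Nat) : Int) := Int.natCast_nonneg _
      omega
    have h2 : PySem.Int.bxor (-(((-r - 1).toNat ^^^ a : Nat) : Int) - 1) (b : Int)
        = -((((-r - 1).toNat ^^^ a) ^^^ b : Nat) : Int) - 1 := by
      simp only [PySem.Int.bxor]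
      rw [if_neg hneg, if_pos (Int.natCast_nonneg b)]
      have hx : (-(-(((-r - 1).toNat ^^^ a : Nat) : Int) - 1) - 1) = (((-r - 1).toNat ^^^ a : Nat) : Int) := by ring
      rw [hx]
      simp
    have h3 : PySem.Int.bxor r ((a ^^^ b : Nat) : Int) = -(((-r - 1).toNat ^^^ (a ^^^ b) : Nat) : Int) - 1 := by
      simp [PySem.Int.bxor, hr]
    rw [h1, h2, h3, Nat.xor_assoc]

-- flipping the lowest bit of an even number adds one
theorem two_mul_xor_one (k : Nat) : (2 * k) ^^^ 1 = 2 * k + 1 := by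
  apply Nat.eq_of_testBit_eq; intro i
  cases i with
  | zero => simp [Nat.testBit_zero, Nat.mul_mod_right, Nat.add_mod]
  | succ j => simp [Nat.testBit_succ, Nat.mul_add_div]

-- the period-4 closed form for XOR of 0..n-1, at the Nat level
def natForm (n : Nat) : Nat :=
  if n % 4 = 0 then 0 else if n % 4 = 1 then n - 1 else if n % 4 = 2 then 1 else n

theorem natForm_step (n : Nat) : natForm n ^^^ n = natForm (n + 1) := by
  have h4 : n % 4 = 0 ∨ n % 4 = 1 ∨ n % 4 = 2 ∨ n % 4 = 3 := by omega
  rcases h4 with h | h | h | h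
  · have h' : (n + 1) % 4 = 1 := by omega
    simp [natForm, h, h']
  · have h' : (n + 1) % 4 = 2 := by omega
    have key : (n - 1) ^^^ n = 1 := by
      obtain ⟨k, hk⟩ : ∃ k, n = 2 * k + 1 := ⟨n / 2, by omega⟩
      subst hk
      have hsub : 2 * k + 1 - 1 = 2 * k := by omega
      rw [hsub, ← two_mul_xor_one, ← Nat.xor_assoc, Nat.xor_self, Nat.zero_xor]
    simp [natForm, h, h', key]
  · have h' : (n + 1) % 4 = 3 := by omega
    have key : (1 : Nat) ^^^ n = n + 1 := by
      obtain ⟨k, hk⟩ : ∃ k, n = 2 * k := ⟨n / 2, by omega⟩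
      subst hk
      rw [Nat.xor_comm, two_mul_xor_one]
    simp [natForm, h, h', key]
  · have h' : (n + 1) % 4 = 0 := by omega
    simp [natForm, h, h', Nat.xor_self]

-- A's index loop, pulled out of the accumulator and closed
theorem rangeFold (n : Nat) (r : Int) :
    (PySem.List.pyRange 0 (n : Int) 1).foldl (fun a i => PySem.Int.bxor a i) r
      = PySem.Int.bxor r ((natForm n : Nat) : Int) := by
  induction n generalizing r with
  | zero =>
    simp [PySem.List.pyRange_one_eq_nil, natForm, PySem.Int.bxor_zero]
  | succ m ih =>
    have hsucc : ((m + 1 : Nat) : Int) = (m : Int) + 1 := by push_cast; ring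
    rw [hsucc, PySem.List.pyRange_one_succ_right (by positivity), List.foldl_append, ih]
    simp only [List.foldl_cons, List.foldl_nil]
    rw [bxor_assoc_natR, natForm_step]

-- B's Int-valued closed form agrees with the Nat-level one
theorem natForm_cast (n : Nat) :
    ((natForm n : Nat) : Int)
      = (if PySem.Int.mod (n : Int) 4 = 0 then 0
         else if PySem.Int.mod (n : Int) 4 = 1 then (n : Int) - 1
         else if PySem.Int.mod (n : Int) 4 = 2 then 1 else (n : Int)) := by
  have hm : PySem.Int.mod (n : Int) 4 = ((n % 4 : Nat) : Int) := by
    simp only [PySem.Int.mod, Int.fmod_eq_emod]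
    push_cast
    simp
  have h4 : n % 4 = 0 ∨ n % 4 = 1 ∨ n % 4 = 2 ∨ n % 4 = 3 := by omega
  rw [hm]
  rcases h4 with h | h | h | h <;> simp [natForm, h] <;> omega

-- ===== VERDICT (by name: the statement is the Claim_ definition above) =====
theorem findDup3_spec : Claim_equal_findDup3 := by
  intro arr _
  unfold Spec_findDup3 findDup3 findDup3_alt
  simp only []
  rw [PySem.List.foldl_pyRange_zero_pyGetD' arr 0 (fun r v => PySem.Int.bxor r v) 0]
  rw [rangeFold arr.length, natForm_cast]
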